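-- pv_equiv track=rewrite | github.com/torelax/EMC | pymarl/src/utils/goalpos.py | getvectorofgoal
-- ===== SOURCE A (Python) =====
-- def getvectorofgoal(goal, ranges):
--     res = []
--     for i in range(ranges * 2):
--         res.append((-ranges, -ranges + i))
--     for i in range(ranges * 2):
--         res.append((-ranges + i, ranges))
--     for i in range(ranges * 2):
--         res.append((ranges, ranges - i))
--     for i in range(ranges * 2):
--         res.append((ranges - i, -ranges))
--     return res[goal]
-- ===== SOURCE B (Python) =====
-- def getvectorofgoal(goal, ranges):
--     n = 2 * ranges
--     side, off = divmod(goal % (8 * ranges), n)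
--     if side == 0:
--         return (-ranges, -ranges + off)
--     elif side == 1:
--         return (-ranges + off, ranges)
--     elif side == 2:
--         return (ranges, ranges - off)
--     else:
--         return (ranges - off, -ranges)
-- ===== Notes on version B (the rewrite author's own statement) =====
-- stated objective: faster
-- what changed: Instead of materialising the whole 8*ranges-point perimeter list and indexing into it, B computes the side and offset of the requested point in closed form with one divmod and returns it directly.
import Mathlib
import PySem

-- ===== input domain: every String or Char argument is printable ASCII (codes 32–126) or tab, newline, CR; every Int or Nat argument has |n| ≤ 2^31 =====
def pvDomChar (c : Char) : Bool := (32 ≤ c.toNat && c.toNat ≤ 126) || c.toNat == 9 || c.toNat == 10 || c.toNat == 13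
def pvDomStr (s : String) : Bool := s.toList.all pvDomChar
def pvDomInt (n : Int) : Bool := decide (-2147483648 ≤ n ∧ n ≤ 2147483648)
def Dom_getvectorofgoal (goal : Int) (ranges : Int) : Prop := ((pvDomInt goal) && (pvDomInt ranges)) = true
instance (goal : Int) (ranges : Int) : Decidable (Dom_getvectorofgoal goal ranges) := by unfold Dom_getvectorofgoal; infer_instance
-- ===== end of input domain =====

-- B replaces A's materialisation of the whole 8*ranges-point perimeter list by a
-- closed-form side/offset computation (one divmod), O(1) instead of O(ranges).

-- ===== PORT A =====
def getvectorofgoal (goal : Int) (ranges : Int) : List Int :=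
  let res : Array (List Int) := #[]   -- Python list with O(1) append; read back as a List for indexing
  let res := (PySem.List.pyRange 0 (ranges * 2) 1).foldl
    (fun res i => res.push [-ranges, -ranges + i]) res
  let res := (PySem.List.pyRange 0 (ranges * 2) 1).foldl
    (fun res i => res.push [-ranges + i, ranges]) res
  let res := (PySem.List.pyRange 0 (ranges * 2) 1).foldl
    (fun res i => res.push [ranges, ranges - i]) res
  let res := (PySem.List.pyRange 0 (ranges * 2) 1).foldl
    (fun res i => res.push [ranges - i, -ranges]) res
  (PySem.List.pyGet? res.toList goal).getD []   -- res[goal]; none (IndexError) excluded by Pre_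

-- ===== PORT B =====
def getvectorofgoal_alt (goal : Int) (ranges : Int) : List Int :=
  let n := 2 * ranges
  let g := PySem.Int.mod goal (8 * ranges)
  let side := PySem.Int.floordiv g n
  let off := PySem.Int.mod g n
  if side = 0 then [-ranges, -ranges + off]
  else if side = 1 then [-ranges + off, ranges]
  else if side = 2 then [ranges, ranges - off]
  else [ranges - off, -ranges]

-- ===== PRECONDITION & SPEC =====
-- Pre_: exactly the inputs where A returns (ranges ≥ 1 and goal a valid Python index
-- into the 8*ranges-element perimeter list); elsewhere A raises IndexError.
def Pre_getvectorofgoal (goal : Int) (ranges : Int) : Prop :=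
  1 ≤ ranges ∧ -(8 * ranges) ≤ goal ∧ goal < 8 * ranges
instance (goal : Int) (ranges : Int) : Decidable (Pre_getvectorofgoal goal ranges) := by
  unfold Pre_getvectorofgoal; infer_instance
def pvWitness_getvectorofgoal : Int × Int := (3, 2)

def Spec_getvectorofgoal (goal : Int) (ranges : Int) (out : List Int) : Prop :=
  out = getvectorofgoal_alt goal ranges
instance (goal : Int) (ranges : Int) (out : List Int) : Decidable (Spec_getvectorofgoal goal ranges out) := by
  unfold Spec_getvectorofgoal; infer_instance

-- ===== CLAIM (what is proved, stated in full; the proofs are below) =====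
def Claim_equal_getvectorofgoal : Prop := ∀ (goal : Int) (ranges : Int),
  Dom_getvectorofgoal goal ranges → Pre_getvectorofgoal goal ranges →
  Spec_getvectorofgoal goal ranges (getvectorofgoal goal ranges)

-- ===== LEMMAS AND PROOFS =====

-- the append loop over an Array accumulator, read back as a List
theorem foldl_push_toList {α β : Type} (l : List β) (f : β → α) (arr : Array α) :
    (l.foldl (fun a i => a.push (f i)) arr).toList = arr.toList ++ l.map f := by
  induction l generalizing arr with
  | nil => simp
  | cons x xs ih => simp [List.foldl_cons]

theorem getvectorofgoal_main : ∀ (goal : Int) (ranges : Int),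
    Pre_getvectorofgoal goal ranges →
    getvectorofgoal goal ranges = getvectorofgoal_alt goal ranges := by
  intro goal ranges hpre
  obtain ⟨hr, hlo, hhi⟩ := hpre
  unfold getvectorofgoal getvectorofgoal_alt
  simp only [foldl_push_toList, List.nil_append]
  have hNN : ranges * 2 = (((ranges * 2).toNat : Int)) := (Int.toNat_of_nonneg (by omega)).symm
  rw [hNN]
  set N := (ranges * 2).toNat with hN
  have hNc : (N : Int) = ranges * 2 := hNN.symm
  set g := PySem.Int.mod goal (8 * ranges) with hgdef
  have hgem : g = goal % (8 * ranges) := PySem.Int.mod_eq_emod_of_pos (by omega)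
  have hg0 : 0 ≤ g := by rw [hgem]; exact Int.emod_nonneg _ (by omega)
  have hglt : g < 8 * ranges := by rw [hgem]; exact Int.emod_lt_of_pos _ (by omega)
  set m0 := (PySem.List.pyRange 0 ((N:Int)) 1).map (fun i => [-ranges, -ranges + i]) with hm0
  set m1 := (PySem.List.pyRange 0 ((N:Int)) 1).map (fun i => [-ranges + i, ranges]) with hm1
  set m2 := (PySem.List.pyRange 0 ((N:Int)) 1).map (fun i => [ranges, ranges - i]) with hm2
  set m3 := (PySem.List.pyRange 0 ((N:Int)) 1).map (fun i => [ranges - i, -ranges]) with hm3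
  have hlen0 : m0.length = N := by simp [hm0, PySem.List.length_pyRange_one]
  have hlen1 : m1.length = N := by simp [hm1, PySem.List.length_pyRange_one]
  have hlen2 : m2.length = N := by simp [hm2, PySem.List.length_pyRange_one]
  have hlen3 : m3.length = N := by simp [hm3, PySem.List.length_pyRange_one]
  set k := g.toNat with hk
  have hkg : (k : Int) = g := Int.toNat_of_nonneg hg0
  have hk4 : k < 4 * N := by omega
  have hlentot : (m0 ++ m1 ++ m2 ++ m3).length = 4 * N := by
    simp [List.length_append, hlen0, hlen1, hlen2, hlen3]; omega
  have hidx : PySem.List.pyGet? (m0 ++ m1 ++ m2 ++ m3) goal = (m0 ++ m1 ++ m2 ++ m3)[k]? := by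
    by_cases hgoal : 0 ≤ goal
    · have h : g = goal := by rw [hgem, Int.emod_eq_of_lt hgoal hhi]
      rw [PySem.List.pyGet?_of_nonneg _ hgoal]
      congr 1; omega
    · have h : g = goal + 8 * ranges := by
        have h8 : (goal + 8 * ranges * 1) % (8 * ranges) = goal % (8 * ranges) :=
          Int.add_mul_emod_self_left goal (8 * ranges) 1
        rw [hgem, ← h8, Int.emod_eq_of_lt (by omega) (by omega)]
        omega
      have hkk : goal = -(((-goal).toNat : Int)) := by omega
      have hle : (-goal).toNat ≤ (m0 ++ m1 ++ m2 ++ m3).length := by rw [hlentot]; omega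
      rw [hkk, PySem.List.pyGet?_neg_natCast _ _ (by omega) hle]
      congr 1; rw [hlentot]; omega
  rw [hidx]
  by_cases hq1 : k < N
  · have hside : PySem.Int.floordiv g (2 * ranges) = 0 := by
      rw [PySem.Int.floordiv_eq_iff_of_pos (by omega)]; omega
    have hoff : PySem.Int.mod g (2 * ranges) = g - 0 * (2 * ranges) := by
      have h := PySem.Int.floordiv_mul_add_mod g (2 * ranges)
      rw [hside] at h; linarith
    rw [List.getElem?_append_left (by simp [hlen0, hlen1, hlen2]; omega),
        List.getElem?_append_left (by simp [hlen0, hlen1]; omega),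
        List.getElem?_append_left (by omega : k < m0.length)]
    rw [hm0, PySem.List.getElem?_map_pyRange_zero _ N k (by omega)]
    rw [hside]
    have hoffk : PySem.Int.mod g (2 * ranges) = (k : Int) := by omega
    rw [hoffk]
    simp
  · by_cases hq2 : k < 2 * N
    · have hside : PySem.Int.floordiv g (2 * ranges) = 1 := by
        rw [PySem.Int.floordiv_eq_iff_of_pos (by omega)]; omega
      have hoff : PySem.Int.mod g (2 * ranges) = g - 1 * (2 * ranges) := by
        have h := PySem.Int.floordiv_mul_add_mod g (2 * ranges)
        rw [hside] at h; linarith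
      rw [List.getElem?_append_left (by simp [hlen0, hlen1, hlen2]; omega),
          List.getElem?_append_left (by simp [hlen0, hlen1]; omega),
          List.getElem?_append_right (by omega : m0.length ≤ k)]
      rw [hlen0, hm1, PySem.List.getElem?_map_pyRange_zero _ N (k - N) (by omega)]
      rw [hside]
      have hoffk : PySem.Int.mod g (2 * ranges) = ((k - N : Nat) : Int) := by
        omega
      rw [hoffk]
      simp
    · by_cases hq3 : k < 3 * N
      · have hside : PySem.Int.floordiv g (2 * ranges) = 2 := by
          rw [PySem.Int.floordiv_eq_iff_of_pos (by omega)]; omega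
        have hoff : PySem.Int.mod g (2 * ranges) = g - 2 * (2 * ranges) := by
          have h := PySem.Int.floordiv_mul_add_mod g (2 * ranges)
          rw [hside] at h; linarith
        rw [List.getElem?_append_left (by simp [hlen0, hlen1, hlen2]; omega),
            List.getElem?_append_right (by simp [hlen0, hlen1]; omega),
            List.length_append, hlen0, hlen1, hm2,
            PySem.List.getElem?_map_pyRange_zero _ N (k - (N + N)) (by omega)]
        rw [hside]
        have hoffk : PySem.Int.mod g (2 * ranges) = ((k - (N + N) : Nat) : Int) := by
          omega
        rw [hoffk]
        simp
      · have hside : PySem.Int.floordiv g (2 * ranges) = 3 := by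
          rw [PySem.Int.floordiv_eq_iff_of_pos (by omega)]; omega
        have hoff : PySem.Int.mod g (2 * ranges) = g - 3 * (2 * ranges) := by
          have h := PySem.Int.floordiv_mul_add_mod g (2 * ranges)
          rw [hside] at h; linarith
        rw [List.getElem?_append_right (by simp [hlen0, hlen1, hlen2]; omega),
            List.length_append, List.length_append, hlen0, hlen1, hlen2, hm3,
            PySem.List.getElem?_map_pyRange_zero _ N (k - (N + N + N)) (by omega)]
        rw [hside]
        have hoffk : PySem.Int.mod g (2 * ranges) = ((k - (N + N + N) : Nat) : Int) := by
          omega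
        rw [hoffk]
        simp

-- ===== VERDICT (by name: the statement is the Claim_ definition above) =====
theorem getvectorofgoal_spec : Claim_equal_getvectorofgoal := by
  intro goal ranges _ hpre
  exact getvectorofgoal_main goal ranges hpre
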